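-- pv_equiv track=rewrite | github.com/sarbeshtiwari/arc-agi-3 | environment_files/eg05/eg05.py | _hit_test_jar
-- ===== SOURCE A (Python) =====
-- GRID_W = 64
--
-- GRID_H = 64
--
-- JAR_W = 8
--
-- UNIT_H = 4
--
-- def _jar_layout(num_jars, max_cap):
--     gap = 4 if num_jars <= 4 else 2
--     total_w = num_jars * JAR_W + (num_jars - 1) * gap
--     start_x = (GRID_W - total_w) // 2
--     jar_h = max_cap * UNIT_H + 2
--     content_h = jar_h + 5
--     top_margin = 6
--     bottom_margin = 6
--     avail = GRID_H - top_margin - bottom_margin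
--     jar_top = top_margin + (avail - content_h) // 2
--     if jar_top < 6:
--         jar_top = 6
--     positions = []
--     for i in range(num_jars):
--         x = start_x + i * (JAR_W + gap)
--         positions.append((x, jar_top))
--     return positions, jar_h, gap
--
-- def _hit_test_jar(jars, click_x, click_y):
--     num = len(jars)
--     if num == 0:
--         return -1
--     max_cap = max(j["cap"] for j in jars)
--     positions, jar_h, gap = _jar_layout(num, max_cap)
--     for i in range(num):
--         jx, jy = positions[i]
--         if jx <= click_x < jx + JAR_W and jy <= click_y < jy + jar_h:
--             return i
--     return -1
-- ===== SOURCE B (Python) =====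
-- GRID_W = 64
-- GRID_H = 64
-- JAR_W = 8
-- UNIT_H = 4
--
-- def _hit_test_jar(jars, click_x, click_y):
--     num = len(jars)
--     if num == 0:
--         return -1
--     max_cap = max(j["cap"] for j in jars)
--     gap = 4 if num <= 4 else 2
--     start_x = (GRID_W - (num * JAR_W + (num - 1) * gap)) // 2
--     jar_h = max_cap * UNIT_H + 2
--     jar_top = max(6, 6 + (GRID_H - 12 - (jar_h + 5)) // 2)
--     if not (jar_top <= click_y < jar_top + jar_h):
--         return -1
--     w = JAR_W + gap
--     d = click_x - start_x
--     i = d // w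
--     if 0 <= i < num and d - i * w < JAR_W:
--         return i
--     return -1
-- ===== Notes on version B (the rewrite author's own statement) =====
-- stated objective: alternative
-- what changed: Replaces the per-jar scan over the built positions list with direct arithmetic: the candidate jar column is computed by one floor division, so no positions list is built and no loop runs for the hit test.
import Mathlib
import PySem

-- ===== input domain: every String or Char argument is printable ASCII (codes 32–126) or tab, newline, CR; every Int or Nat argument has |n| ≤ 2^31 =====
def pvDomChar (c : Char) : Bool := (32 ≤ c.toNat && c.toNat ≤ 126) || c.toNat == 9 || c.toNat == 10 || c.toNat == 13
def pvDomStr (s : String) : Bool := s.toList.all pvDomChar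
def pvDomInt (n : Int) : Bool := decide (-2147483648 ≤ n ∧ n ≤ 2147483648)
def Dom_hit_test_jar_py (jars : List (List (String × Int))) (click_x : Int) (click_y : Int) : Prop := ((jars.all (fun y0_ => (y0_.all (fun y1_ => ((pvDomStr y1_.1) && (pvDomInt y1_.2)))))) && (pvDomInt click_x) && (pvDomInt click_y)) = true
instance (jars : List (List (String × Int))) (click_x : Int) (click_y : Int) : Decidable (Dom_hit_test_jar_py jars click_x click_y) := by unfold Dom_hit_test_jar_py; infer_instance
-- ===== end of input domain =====

-- B replaces A's scan over the positions list by one floor division (no positions list, no loop).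
-- ===== PORT A =====
-- port of _jar_layout (returns (positions, jar_h, gap))
def jar_layout_py (num_jars : Nat) (max_cap : Int) : List (Int × Int) × Int × Int :=
  let gap : Int := if num_jars ≤ 4 then 4 else 2
  let total_w : Int := (num_jars : Int) * 8 + ((num_jars : Int) - 1) * gap
  let start_x := PySem.Int.floordiv (64 - total_w) 2
  let jar_h := max_cap * 4 + 2
  let content_h := jar_h + 5
  let avail : Int := 64 - 6 - 6
  let jar_top0 := 6 + PySem.Int.floordiv (avail - content_h) 2
  let jar_top := if jar_top0 < 6 then 6 else jar_top0
  let positions := (List.range num_jars).map (fun i : Nat => (start_x + (i : Int) * (8 + gap), jar_top))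
  (positions, jar_h, gap)

-- the 'for i in range(num)' early-return scan over positions
def hitLoopA (cx cy jar_h : Int) : List (Int × Int) → Int → Int
  | [], _ => -1
  | (jx, jy) :: rest, idx =>
      if jx ≤ cx ∧ cx < jx + 8 ∧ jy ≤ cy ∧ cy < jy + jar_h then idx
      else hitLoopA cx cy jar_h rest (idx + 1)

def hit_test_jar_py (jars : List (List (String × Int))) (click_x : Int) (click_y : Int) : Int :=
  let num := jars.length
  if num = 0 then -1
  else
    -- j["cap"]: first-match lookup; Pre_ guarantees the key exists, so getD 0 is never the default
    let max_cap := (PySem.List.max? (jars.map (fun j => (j.lookup "cap").getD 0)) (fun x => x)).getD 0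
    let r := jar_layout_py num max_cap
    hitLoopA click_x click_y r.2.1 r.1 0

-- ===== PORT B =====
def hit_test_jar_py_alt (jars : List (List (String × Int))) (click_x : Int) (click_y : Int) : Int :=
  let num := jars.length
  if num = 0 then -1
  else
    let max_cap := (PySem.List.max? (jars.map (fun j => (j.lookup "cap").getD 0)) (fun x => x)).getD 0
    let gap : Int := if num ≤ 4 then 4 else 2
    let start_x := PySem.Int.floordiv (64 - ((num : Int) * 8 + ((num : Int) - 1) * gap)) 2
    let jar_h := max_cap * 4 + 2
    let jar_top := max 6 (6 + PySem.Int.floordiv (64 - 12 - (jar_h + 5)) 2)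
    if jar_top ≤ click_y ∧ click_y < jar_top + jar_h then
      let w := 8 + gap
      let d := click_x - start_x
      let i := PySem.Int.floordiv d w
      if 0 ≤ i ∧ i < (num : Int) ∧ d - i * w < 8 then i else -1
    else -1

-- ===== PRECONDITION & SPEC =====
-- Pre_ excludes jars missing the "cap" key, on which Python A raises KeyError.
def Pre_hit_test_jar_py (jars : List (List (String × Int))) (click_x : Int) (click_y : Int) : Prop :=
  ∀ j ∈ jars, (j.lookup "cap").isSome = true
instance (jars : List (List (String × Int))) (click_x : Int) (click_y : Int) : Decidable (Pre_hit_test_jar_py jars click_x click_y) := by unfold Pre_hit_test_jar_py; infer_instance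
def pvWitness_hit_test_jar_py : (List (List (String × Int))) × Int × Int := ([[("cap", 2)]], 28, 26)
def Spec_hit_test_jar_py (jars : List (List (String × Int))) (click_x : Int) (click_y : Int) (out : Int) : Prop := out = hit_test_jar_py_alt jars click_x click_y
instance (jars : List (List (String × Int))) (click_x : Int) (click_y : Int) (out : Int) : Decidable (Spec_hit_test_jar_py jars click_x click_y out) := by unfold Spec_hit_test_jar_py; infer_instance

-- ===== CLAIM (what is proved, stated in full; the proofs are below) =====
def Claim_equal_hit_test_jar_py : Prop := ∀ (jars : List (List (String × Int))) (click_x : Int) (click_y : Int), Dom_hit_test_jar_py jars click_x click_y → Pre_hit_test_jar_py jars click_x click_y → Spec_hit_test_jar_py jars click_x click_y (hit_test_jar_py jars click_x click_y)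

-- ===== LEMMAS AND PROOFS =====
-- The scan over consecutive positions equals the floor-division form.
lemma hitLoopA_range (cx cy jar_h sx jt w : Int) (hw : w = 10 ∨ w = 12)
    (num k : Nat) :
    hitLoopA cx cy jar_h
      ((List.range num).map (fun i : Nat => (sx + ((k : Int) + (i : Int)) * w, jt))) (k : Int)
    = (if jt ≤ cy ∧ cy < jt + jar_h ∧ (k : Int) ≤ PySem.Int.floordiv (cx - sx) w ∧
          PySem.Int.floordiv (cx - sx) w < (k : Int) + (num : Int) ∧
          (cx - sx) - (PySem.Int.floordiv (cx - sx) w) * w < 8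
        then PySem.Int.floordiv (cx - sx) w else -1) := by
  have hw0 : (0 : Int) < w := by rcases hw with h | h <;> omega
  have hqr := PySem.Int.floordiv_mul_add_mod (cx - sx) w
  have hr0 := PySem.Int.mod_nonneg (cx - sx) hw0
  have hrw := PySem.Int.mod_lt (cx - sx) hw0
  set q := PySem.Int.floordiv (cx - sx) w with hq
  set r := PySem.Int.mod (cx - sx) w with hr
  clear_value q r
  induction num generalizing k with
  | zero => simp only [List.range_zero, List.map_nil, hitLoopA]
            rcases hw with h | h <;> subst h <;> split_ifs <;> omega
  | succ n ih =>
      rw [List.range_succ_eq_map, List.map_cons, List.map_map]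
      have hfun : ((fun i : Nat => (sx + ((k : Int) + (i : Int)) * w, jt)) ∘ Nat.succ)
          = fun i : Nat => (sx + (((k + 1 : Nat) : Int) + (i : Int)) * w, jt) := by
        funext i; simp only [Function.comp]; push_cast; ring_nf
      rw [hfun]
      show hitLoopA cx cy jar_h (_ :: _) _ = _
      rw [hitLoopA]
      have hk1 : ((k : Int) + 1) = ((k + 1 : Nat) : Int) := by push_cast; ring
      rw [hk1, ih]
      rcases hw with h | h <;> subst h <;> push_cast <;> split_ifs <;> omega

-- ===== VERDICT (by name: the statement is the Claim_ definition above) =====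
theorem hit_test_jar_py_spec : Claim_equal_hit_test_jar_py := by
  intro jars cx cy _ _
  unfold Spec_hit_test_jar_py hit_test_jar_py hit_test_jar_py_alt jar_layout_py
  by_cases h0 : jars.length = 0
  · simp [h0]
  · simp only [h0, if_false]
    set num := jars.length with hnum
    set max_cap := (PySem.List.max? (jars.map (fun j => (j.lookup "cap").getD 0)) (fun x => x)).getD 0 with hmc
    set gap : Int := if num ≤ 4 then 4 else 2 with hgap
    have hw : 8 + gap = 10 ∨ 8 + gap = 12 := by
      rw [hgap]; split_ifs <;> [right; left] <;> ring
    set sx := PySem.Int.floordiv (64 - ((num : Int) * 8 + ((num : Int) - 1) * gap)) 2 with hsx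
    set jar_h := max_cap * 4 + 2 with hjh
    set jt0 := 6 + PySem.Int.floordiv (64 - 6 - 6 - (jar_h + 5)) 2 with hjt0
    have hmaxeq : (if jt0 < 6 then (6 : Int) else jt0) = max 6 jt0 := by omega
    have h12 : (64 : Int) - 12 - (jar_h + 5) = 64 - 6 - 6 - (jar_h + 5) := by ring
    simp only [h12, ← hjt0, hmaxeq]
    have hfun0 : (fun i : Nat => (sx + (i : Int) * (8 + gap), max 6 jt0))
        = fun i : Nat => (sx + (((0 : Nat) : Int) + (i : Int)) * (8 + gap), max 6 jt0) := by
      funext i; push_cast; ring_nf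
    rw [hfun0]
    have := hitLoopA_range cx cy jar_h sx (max 6 jt0) (8 + gap) hw num 0
    push_cast at this ⊢
    rw [this]
    split_ifs <;> omega
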